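-- pv_equiv track=rewrite | github.com/eplatero97/efficient-transformers | QEfficient/utils/tree_attn_utils.py | group_by_depth
-- ===== SOURCE A (Python) =====
-- def bfs_sort(lst):
--     return sorted(lst, key=lambda x: (len(x), [i for i in x]))
--
-- def group_by_depth(tree_attn_choices):
--     sorted_choices = bfs_sort(tree_attn_choices)
--     grouped_list = []
--     current_length = len(sorted_choices[0])
--     current_group = []
--
--     for elem in sorted_choices:
--         if len(elem) == current_length:
--             current_group.append(elem)
--         else:
--             grouped_list.append(current_group)
--             current_length = len(elem)
--             current_group = [elem]
--     grouped_list.append(current_group)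
--     return grouped_list
-- ===== SOURCE B (Python) =====
-- def group_by_depth(tree_attn_choices):
--     buckets = {}
--     for elem in tree_attn_choices:
--         buckets.setdefault(len(elem), []).append(elem)
--     return [sorted(buckets[k]) for k in sorted(buckets)]
-- ===== Notes on version B (the rewrite author's own statement) =====
-- stated objective: alternative
-- what changed: A sorts the whole list once by the tuple key (len, elements) and then splits consecutive equal-length runs with a stateful loop; B builds a dict bucketing elements by length in one pass and emits each bucket lexicographically sorted in ascending key order.
import Mathlib
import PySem

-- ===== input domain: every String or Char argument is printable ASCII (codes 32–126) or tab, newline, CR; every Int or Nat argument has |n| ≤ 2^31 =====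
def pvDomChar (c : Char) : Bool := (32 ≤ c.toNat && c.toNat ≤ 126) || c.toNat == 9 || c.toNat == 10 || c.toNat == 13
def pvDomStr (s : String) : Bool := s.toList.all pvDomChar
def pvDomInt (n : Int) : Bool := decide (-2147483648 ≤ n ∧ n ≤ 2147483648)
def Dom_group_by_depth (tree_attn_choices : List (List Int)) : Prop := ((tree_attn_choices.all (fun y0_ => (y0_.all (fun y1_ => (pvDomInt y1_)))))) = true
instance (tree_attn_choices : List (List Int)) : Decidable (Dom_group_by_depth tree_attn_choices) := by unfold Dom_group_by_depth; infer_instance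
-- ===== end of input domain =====

-- B replaces A's global sort + consecutive-run splitting by a one-pass length-bucket
-- table followed by per-bucket sorts (objective: alternative decomposition, same result).

-- ===== PORT A =====
-- bfs_sort(lst) = sorted(lst, key=lambda x: (len(x), [i for i in x]))
def bfs_sort (lst : List (List Int)) : List (List Int) :=
  PySem.List.sorted2 lst (fun x => PySem.List.len x) (fun x => x)

def group_by_depth (tree_attn_choices : List (List Int)) : List (List (List Int)) :=
  let sorted_choices := bfs_sort tree_attn_choices
  match PySem.List.pyGet? sorted_choices 0 with
  | none => []   -- Python raises IndexError here (empty input); excluded by Pre_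
  | some first =>
    let st := sorted_choices.foldl
      (fun (st : List (List (List Int)) × Int × List (List Int)) elem =>
        if PySem.List.len elem == st.2.1 then (st.1, st.2.1, st.2.2 ++ [elem])
        else (st.1 ++ [st.2.2], PySem.List.len elem, [elem]))
      (([] : List (List (List Int))), PySem.List.len first, ([] : List (List Int)))
    st.1 ++ [st.2.2]

-- ===== PORT B =====
def group_by_depth_alt (tree_attn_choices : List (List Int)) : List (List (List Int)) :=
  -- buckets.setdefault(len(elem), []).append(elem)  ==  modify (len elem) [] (· ++ [elem]); exact
  let buckets := tree_attn_choices.foldl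
    (fun (d : PySem.Dict Int (List (List Int))) elem =>
      d.modify (PySem.List.len elem) [] (fun b => b ++ [elem])) PySem.Dict.empty
  -- buckets[k] for k ∈ sorted(buckets): getD with a default the lookup never uses
  (PySem.List.sorted buckets.keys (fun k => k)).map
    (fun k => PySem.List.sorted (buckets.getD k []) (fun x => x))

-- ===== PRECONDITION & SPEC =====
-- A indexes sorted_choices[0]: it raises IndexError exactly on the empty list.
def Pre_group_by_depth (tree_attn_choices : List (List Int)) : Prop := tree_attn_choices ≠ []
instance (tree_attn_choices : List (List Int)) : Decidable (Pre_group_by_depth tree_attn_choices) := by unfold Pre_group_by_depth; infer_instance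
def pvWitness_group_by_depth : List (List Int) := [[1], [0, 1], [2], [0]]

def Spec_group_by_depth (tree_attn_choices : List (List Int)) (out : List (List (List Int))) : Prop := out = group_by_depth_alt tree_attn_choices
instance (tree_attn_choices : List (List Int)) (out : List (List (List Int))) : Decidable (Spec_group_by_depth tree_attn_choices out) := by unfold Spec_group_by_depth; infer_instance

-- ===== CLAIM (what is proved, stated in full; the proofs are below) =====
def Claim_equal_group_by_depth : Prop := ∀ (tree_attn_choices : List (List Int)), Dom_group_by_depth tree_attn_choices → Pre_group_by_depth tree_attn_choices → Spec_group_by_depth tree_attn_choices (group_by_depth tree_attn_choices)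

-- ===== LEMMAS AND PROOFS =====

-- the lexicographic tuple key (len x, x) of bfs_sort as a single LinearOrder key
def lexKey (e : List Int) : Lex (Int × List Int) := toLex (PySem.List.len e, e)

theorem sorted2_eq_sorted_lexKey (xs : List (List Int)) :
    PySem.List.sorted2 xs (fun x => PySem.List.len x) (fun x => x) =
      PySem.List.sorted xs lexKey := by
  unfold PySem.List.sorted2 PySem.List.sorted
  simp only [if_neg]
  congr 1
  funext acc x
  congr 1
  funext a b
  show (decide (PySem.List.len a < PySem.List.len b) || (!decide (PySem.List.len b < PySem.List.len a) && decide (a < b))) = decide (lexKey a < lexKey b)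
  have hlex : (lexKey a < lexKey b) ↔ (PySem.List.len a < PySem.List.len b ∨ (PySem.List.len a = PySem.List.len b ∧ a < b)) := Prod.Lex.lt_iff
  simp only [hlex, PySem.List.len]
  by_cases h1 : (a.length : Int) < b.length
  · simp [h1]
  · by_cases h2 : (b.length : Int) < a.length
    · have h3 : ¬ (a.length : Int) = b.length := by omega
      simp [h1, h2, h3]
    · have h3 : (a.length : Int) = b.length := by omega
      simp [h1, h2, h3]

def groups (L : Int) (cur : List (List Int)) : List (List Int) → List (List (List Int))
  | [] => [cur]
  | e :: ys =>
    if PySem.List.len e == L then groups L (cur ++ [e]) ys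
    else cur :: groups (PySem.List.len e) [e] ys

theorem foldl_eq_groups (ys : List (List Int)) (acc : List (List (List Int)))
    (L : Int) (cur : List (List Int)) :
    (ys.foldl
      (fun (st : List (List (List Int)) × Int × List (List Int)) elem =>
        if PySem.List.len elem == st.2.1 then (st.1, st.2.1, st.2.2 ++ [elem])
        else (st.1 ++ [st.2.2], PySem.List.len elem, [elem])) (acc, L, cur)).1
      ++ [(ys.foldl
      (fun (st : List (List (List Int)) × Int × List (List Int)) elem =>
        if PySem.List.len elem == st.2.1 then (st.1, st.2.1, st.2.2 ++ [elem])
        else (st.1 ++ [st.2.2], PySem.List.len elem, [elem])) (acc, L, cur)).2.2]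
    = acc ++ groups L cur ys := by
  induction ys generalizing acc L cur with
  | nil => simp [groups]
  | cons e ys ih =>
    by_cases h : PySem.List.len e == L
    · simp only [List.foldl_cons, groups, h, if_pos]
      exact ih acc L (cur ++ [e])
    · simp only [List.foldl_cons, groups, h, if_neg, Bool.false_eq_true, not_false_iff]
      rw [ih (acc ++ [cur]) (PySem.List.len e) [e]]
      simp
def gs : List (List Int) → List (List (List Int))
  | [] => []
  | e :: ys =>
    (e :: ys.filter (fun f => PySem.List.len f == PySem.List.len e)) ::
      gs (ys.filter (fun f => !(PySem.List.len f == PySem.List.len e)))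
termination_by ys => ys.length
decreasing_by
  simp only [List.unattach, List.length_map, List.length_cons]
  exact Nat.lt_succ_of_le (le_trans (List.length_filter_le _ _) (by simp))

theorem groups_spec (ys : List (List Int)) (L : Int) (cur : List (List Int))
    (hp : ys.Pairwise (fun a b => PySem.List.len a ≤ PySem.List.len b))
    (hL : ∀ e ∈ ys, L ≤ PySem.List.len e) :
    groups L cur ys =
      (cur ++ ys.filter (fun e => PySem.List.len e == L)) ::
        gs (ys.filter (fun e => !(PySem.List.len e == L))) := by
  induction ys generalizing L cur with
  | nil => simp [groups, gs]
  | cons e ys ih =>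
    rw [List.pairwise_cons] at hp
    obtain ⟨he, hp⟩ := hp
    by_cases h : PySem.List.len e = L
    · have hb : (PySem.List.len e == L) = true := by simpa using h
      rw [groups, if_pos hb, ih L (cur ++ [e]) hp (fun f hf => hL f (List.mem_cons_of_mem _ hf))]
      simp only [List.filter_cons, hb, Bool.not_true, Bool.false_eq_true, if_pos, if_neg]
      simp
    · have hb : (PySem.List.len e == L) = false := by simpa using h
      have hlt : L < PySem.List.len e := lt_of_le_of_ne (hL e (List.mem_cons_self)) (fun hc => h hc.symm)
      rw [groups, if_neg (by simp only [hb]; exact Bool.false_ne_true), ih (PySem.List.len e) [e] hp he]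
      have h1 : (e :: ys).filter (fun f => PySem.List.len f == L) = [] := by
        rw [List.filter_eq_nil_iff]
        intro f hf
        rcases List.mem_cons.mp hf with rfl | hf
        · simpa using h
        · have : PySem.List.len e ≤ PySem.List.len f := he f hf
          simp only [PySem.List.len] at this hlt ⊢
          simp; omega
      have h2 : (e :: ys).filter (fun f => !(PySem.List.len f == L)) = e :: ys := by
        rw [List.filter_eq_self]
        intro f hf
        rcases List.mem_cons.mp hf with rfl | hf
        · simpa using h
        · have : PySem.List.len e ≤ PySem.List.len f := he f hf
          simp only [PySem.List.len] at this hlt ⊢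
          simp; omega
      rw [h1, h2, gs]
      simp

theorem gs_spec (ys : List (List Int))
    (hp : ys.Pairwise (fun a b => PySem.List.len a ≤ PySem.List.len b)) :
    gs ys = (PySem.List.sorted (PySem.Set.ofList (ys.map PySem.List.len)) (fun k => k)).map
      (fun L => ys.filter (fun e => PySem.List.len e == L)) := by
  induction ys using gs.induct with
  | case1 => simp [gs, PySem.Set.ofList, PySem.Set.empty, PySem.List.sorted]
  | case2 e ys ih =>
    rw [List.pairwise_cons] at hp
    obtain ⟨he, hp'⟩ := hp
    have hpf : (ys.filter (fun f => !(PySem.List.len f == PySem.List.len e))).Pairwise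
        (fun a b => PySem.List.len a ≤ PySem.List.len b) := hp'.filter _
    have hmemf : ∀ m : Int, m ∈ (ys.filter (fun f => !(PySem.List.len f == PySem.List.len e))).map PySem.List.len →
        PySem.List.len e < m := by
      intro m hm
      obtain ⟨f, hf, rfl⟩ := List.mem_map.mp hm
      obtain ⟨hfy, hfne⟩ := List.mem_filter.mp hf
      have h1 := he f hfy
      have h2 : ¬ (PySem.List.len f = PySem.List.len e) := by simpa using hfne
      omega
    have htail_mem : ∀ m ∈ PySem.List.sorted (PySem.Set.ofList
        ((ys.filter (fun f => !(PySem.List.len f == PySem.List.len e))).map PySem.List.len)) (fun k => k),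
        PySem.List.len e < m := by
      intro m hm
      rw [PySem.List.mem_sorted, PySem.Set.mem_ofList] at hm
      exact hmemf m hm
    have hkeys : PySem.List.sorted (PySem.Set.ofList ((e :: ys).map PySem.List.len)) (fun k => k)
        = PySem.List.len e :: PySem.List.sorted (PySem.Set.ofList
            ((ys.filter (fun f => !(PySem.List.len f == PySem.List.len e))).map PySem.List.len)) (fun k => k) := by
      apply PySem.List.sorted_eq_of_perm_of_pairwise_lt
      · apply List.perm_of_nodup_nodup_toFinset_eq
        · rw [List.nodup_cons]
          refine ⟨fun hc => lt_irrefl _ (htail_mem _ hc), ?_⟩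
          exact ((PySem.List.sorted_perm _ _ _).nodup_iff).mpr (PySem.Set.nodup_ofList _)
        · exact PySem.Set.nodup_ofList _
        · ext m
          simp only [List.mem_toFinset, List.mem_cons, PySem.List.mem_sorted, PySem.Set.mem_ofList,
            List.mem_map, List.mem_filter]
          constructor
          · rintro (rfl | ⟨f, ⟨hfy, _⟩, rfl⟩)
            · exact ⟨e, Or.inl rfl, rfl⟩
            · exact ⟨f, Or.inr hfy, rfl⟩
          · rintro ⟨f, rfl | hfy, rfl⟩
            · exact Or.inl rfl
            · by_cases hfe : PySem.List.len f = PySem.List.len e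
              · exact Or.inl hfe
              · exact Or.inr ⟨f, ⟨hfy, by simpa using hfe⟩, rfl⟩
      · rw [List.pairwise_cons]
        exact ⟨htail_mem, PySem.List.sorted_ofList_pairwise_lt _⟩
    simp only [List.unattach_filter, List.unattach_attach] at ih
    rw [gs, ih hpf, hkeys, List.map_cons]
    congr 1
    · simp [List.filter_cons]
    · apply List.map_congr_left
      intro L hL
      have hLne : PySem.List.len e ≠ L := ne_of_lt (htail_mem L hL)
      rw [List.filter_cons]
      simp only [beq_iff_eq, hLne, if_neg, Bool.false_eq_true, not_false_iff]
      rw [List.filter_filter]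
      apply List.filter_congr
      intro a _
      by_cases ha : PySem.List.len a = L
      · simp only [PySem.List.len] at ha hLne ⊢
        simp [ha]
        omega
      · simp [ha]
        intro h'
        exact absurd h' ha

theorem lenle_of_lexKey_le {a b : List Int} (h : lexKey a ≤ lexKey b) :
    PySem.List.len a ≤ PySem.List.len b := by
  rcases Prod.Lex.le_iff.mp h with h1 | ⟨h1, _⟩
  · exact le_of_lt h1
  · exact le_of_eq h1

theorem sorted_id_instLT_eq (xs : List (List Int)) :
    @PySem.List.sorted (List Int) (List Int) List.instLT (fun a b => a.decidableLT b) xs (fun x => x) false =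
    @PySem.List.sorted (List Int) (List Int) _ (@LinearOrder.toDecidableLT _ inferInstance) xs (fun x => x) false := by
  unfold PySem.List.sorted
  simp only [if_neg]
  congr 1
  funext acc x
  congr 1
  funext a b
  apply decide_eq_decide.mpr
  exact ⟨fun h => h, fun h => h⟩

theorem final_spec (tac : List (List Int)) (hpre : tac ≠ []) :
    group_by_depth tac = group_by_depth_alt tac := by
  have hperm : (PySem.List.sorted tac lexKey).Perm tac := PySem.List.sorted_perm _ _ _
  have hne : PySem.List.sorted tac lexKey ≠ [] := by
    rw [Ne, PySem.List.sorted_eq_nil_iff]; exact hpre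
  obtain ⟨x, t, hxt⟩ := List.exists_cons_of_ne_nil hne
  have hplex : (PySem.List.sorted tac lexKey).Pairwise (fun a b => lexKey a ≤ lexKey b) :=
    PySem.List.sorted_pairwise _ _
  have hplen : (PySem.List.sorted tac lexKey).Pairwise
      (fun a b => PySem.List.len a ≤ PySem.List.len b) :=
    hplex.imp lenle_of_lexKey_le
  have hhead : ∀ f ∈ PySem.List.sorted tac lexKey, PySem.List.len x ≤ PySem.List.len f := by
    intro f hf
    have := PySem.List.key_head_sorted_le tac lexKey hxt f ((PySem.List.mem_sorted _ _ _ _).mp hf)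
    exact lenle_of_lexKey_le this
  -- A's side reduces to gs of the sorted list
  have hA : group_by_depth tac = gs (PySem.List.sorted tac lexKey) := by
    unfold group_by_depth bfs_sort
    rw [sorted2_eq_sorted_lexKey]
    rw [hxt]
    have h0 : PySem.List.pyGet? (x :: t) 0 = some x := by
      simp [PySem.List.pyGet?, PySem.List.pyIdx?]
    simp only [h0]
    rw [foldl_eq_groups]
    rw [groups_spec _ _ _ (hxt ▸ hplen) (hxt ▸ hhead)]
    rw [gs]
    simp [List.filter_cons]
  rw [hA, gs_spec _ hplen]
  unfold group_by_depth_alt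
  -- B's buckets
  have hkeys : (tac.foldl (fun (d : PySem.Dict Int (List (List Int))) elem =>
      d.modify (PySem.List.len elem) [] (fun b => b ++ [elem])) PySem.Dict.empty).keys
      = PySem.Set.ofList (tac.map PySem.List.len) := by
    rw [PySem.Dict.keys_foldl_modify_key tac PySem.List.len [] (fun _ elem => fun b => b ++ [elem])]
    rw [PySem.Dict.keys_empty]
    rfl
  have hgetD : ∀ L : Int, (tac.foldl (fun (d : PySem.Dict Int (List (List Int))) elem =>
      d.modify (PySem.List.len elem) [] (fun b => b ++ [elem])) PySem.Dict.empty).getD L []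
      = tac.filter (fun e => PySem.List.len e == L) := by
    intro L
    have hm : tac.foldl (fun (d : PySem.Dict Int (List (List Int))) elem =>
        d.modify (PySem.List.len elem) [] (fun b => b ++ [elem])) PySem.Dict.empty
        = (tac.map (fun e => (PySem.List.len e, e))).foldl
            (fun d p => d.modify p.1 [] (fun b => b ++ [p.2])) PySem.Dict.empty := by
      rw [List.foldl_map]
    rw [hm, PySem.Dict.getD_foldl_modify_append]
    simp [List.filter_map, Function.comp_def]
  simp only [hkeys, hgetD]
  -- key lists agree
  have hkeq : PySem.List.sorted (PySem.Set.ofList ((PySem.List.sorted tac lexKey).map PySem.List.len)) (fun k => k)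
      = PySem.List.sorted (PySem.Set.ofList (tac.map PySem.List.len)) (fun k => k) := by
    apply PySem.List.sorted_eq_sorted_of_perm _ _ _ (fun a b h => h)
    apply List.perm_of_nodup_nodup_toFinset_eq (PySem.Set.nodup_ofList _) (PySem.Set.nodup_ofList _)
    ext m
    simp only [List.mem_toFinset, PySem.Set.mem_ofList, List.mem_map]
    constructor
    · rintro ⟨f, hf, rfl⟩; exact ⟨f, hperm.mem_iff.mp hf, rfl⟩
    · rintro ⟨f, hf, rfl⟩; exact ⟨f, hperm.mem_iff.mpr hf, rfl⟩
  rw [hkeq]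
  apply List.map_congr_left
  intro L _
  rw [sorted_id_instLT_eq]
  -- per-bucket: run of sorted list = sorted bucket
  apply (PySem.List.sorted_id_eq_of_perm_of_pairwise _ _ ?_ ?_).symm
  · exact hperm.filter _
  · apply List.Pairwise.imp_of_mem ?_ (hplex.filter (fun e => PySem.List.len e == L))
    intro a b ha hb hab
    have ha' : PySem.List.len a = L := by simpa using (List.mem_filter.mp ha).2
    have hb' : PySem.List.len b = L := by simpa using (List.mem_filter.mp hb).2
    rcases Prod.Lex.le_iff.mp hab with h1 | ⟨_, h2⟩
    · exact absurd (ha'.trans hb'.symm) (ne_of_lt h1)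
    · exact h2

-- ===== VERDICT (by name: the statement is the Claim_ definition above) =====
theorem group_by_depth_spec : Claim_equal_group_by_depth := by
  intro tac _ hpre
  unfold Spec_group_by_depth
  exact final_spec tac hpre
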